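-- pv_equiv track=rewrite | github.com/rxmpwr/d25f37c17283c0cd23075873046b766f | create_prompts.py | _analyze_themes_from_transcripts
-- ===== SOURCE A (Python) =====
-- from typing import Dict, List, Optional
--
-- def _analyze_themes_from_transcripts(transcripts: List[Dict]) -> List[str]:
--     """Analyze main themes from transcripts."""
--     themes = []
--     theme_keywords = {
--         'Relationships': ['love', 'relationship', 'partner', 'dating', 'marriage'],
--         'Psychology': ['psychology', 'mind', 'brain', 'behavior', 'emotion'],
--         'Self Development': ['growth', 'improve', 'success', 'confidence', 'goal'],
--         'Mental Health': ['anxiety', 'depression', 'stress', 'mental health', 'therapy'],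
--         'Communication': ['communication', 'talk', 'speak', 'listen', 'conversation'],
--         'Motivation': ['motivation', 'inspire', 'dream', 'purpose', 'passion']
--     }
--
--     all_text = ' '.join([t.get('full_text', '') for t in transcripts]).lower()
--
--     for theme, keywords in theme_keywords.items():
--         score = sum(all_text.count(keyword) for keyword in keywords)
--         if score > 0:
--             themes.append({'theme': theme, 'score': score})
--
--     # Sort by score and return top themes
--     themes.sort(key=lambda x: x['score'], reverse=True)
--     return [t['theme'] for t in themes[:3]]
-- ===== SOURCE B (Python) =====
-- from typing import Dict, List, Optional
--
-- def _insert_desc(top, item):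
--     """Insert item into a score-descending list, after any entries with an equal or higher score."""
--     if not top or top[0][1] < item[1]:
--         return [item] + top
--     return [top[0]] + _insert_desc(top[1:], item)
--
-- def _analyze_themes_from_transcripts(transcripts: List[Dict]) -> List[str]:
--     """Analyze main themes from transcripts."""
--     theme_keywords = {
--         'Relationships': ['love', 'relationship', 'partner', 'dating', 'marriage'],
--         'Psychology': ['psychology', 'mind', 'brain', 'behavior', 'emotion'],
--         'Self Development': ['growth', 'improve', 'success', 'confidence', 'goal'],
--         'Mental Health': ['anxiety', 'depression', 'stress', 'mental health', 'therapy'],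
--         'Communication': ['communication', 'talk', 'speak', 'listen', 'conversation'],
--         'Motivation': ['motivation', 'inspire', 'dream', 'purpose', 'passion']
--     }
--
--     all_text = ' '.join([t.get('full_text', '') for t in transcripts]).lower()
--
--     # Keep only the current top 3 (theme, score) pairs, in descending score,
--     # ties in dict order — no full sort needed.
--     top = []
--     for theme, keywords in theme_keywords.items():
--         score = sum(all_text.count(keyword) for keyword in keywords)
--         if score > 0:
--             top = _insert_desc(top, (theme, score))[:3]
--     return [t for t, _ in top]
-- ===== Notes on version B (the rewrite author's own statement) =====
-- stated objective: alternative
-- what changed: Instead of collecting all positive-score themes, sorting the whole list in place and slicing, B maintains only the current top-3 (theme, score) pairs with a single bounded descending insertion per theme (truncate to 3), so no full sort is performed.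
import Mathlib
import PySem

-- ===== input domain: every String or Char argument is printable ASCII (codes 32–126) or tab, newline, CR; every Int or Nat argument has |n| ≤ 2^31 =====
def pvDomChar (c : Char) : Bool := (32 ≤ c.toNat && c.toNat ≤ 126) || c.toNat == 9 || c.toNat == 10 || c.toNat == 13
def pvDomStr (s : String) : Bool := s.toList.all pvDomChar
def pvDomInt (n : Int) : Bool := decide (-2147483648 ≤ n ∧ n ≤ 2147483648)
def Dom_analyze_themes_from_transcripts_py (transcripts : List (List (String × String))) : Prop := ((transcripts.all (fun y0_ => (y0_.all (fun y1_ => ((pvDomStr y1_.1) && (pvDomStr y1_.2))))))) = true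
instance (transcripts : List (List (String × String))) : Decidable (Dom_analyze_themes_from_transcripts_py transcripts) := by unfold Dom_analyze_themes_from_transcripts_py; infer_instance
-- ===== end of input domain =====

-- B keeps only the current top-3 pairs via a bounded descending insertion instead of sorting all themes; alternative (no measured speedup).

-- the fixed keyword table (shared constant of both the Python sources)
def pvThemeKeywords : List (String × List String) :=
  [("Relationships", ["love", "relationship", "partner", "dating", "marriage"]),
   ("Psychology", ["psychology", "mind", "brain", "behavior", "emotion"]),
   ("Self Development", ["growth", "improve", "success", "confidence", "goal"]),
   ("Mental Health", ["anxiety", "depression", "stress", "mental health", "therapy"]),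
   ("Communication", ["communication", "talk", "speak", "listen", "conversation"]),
   ("Motivation", ["motivation", "inspire", "dream", "purpose", "passion"])]

-- ===== PORT A =====
def analyze_themes_from_transcripts_py (transcripts : List (List (String × String))) : List String :=
  let all_text := PySem.Str.lower (PySem.Str.join " " (transcripts.map (fun t => PySem.Dict.getD ⟨t⟩ "full_text" "")))
  let themes := pvThemeKeywords.foldl (fun acc p =>
      let score : Int := (p.2.map (fun kw => (PySem.Str.count all_text kw : Int))).sum
      if score > 0 then acc ++ [(p.1, score)] else acc) ([] : List (String × Int))
  ((PySem.List.sorted themes (·.2) true).take 3).map (·.1)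

-- ===== PORT B =====
-- Source B's _insert_desc: insert after all entries with an equal or higher score
def pvInsertDesc (top : List (String × Int)) (item : String × Int) : List (String × Int) :=
  match top with
  | [] => [item]
  | y :: ys => if y.2 < item.2 then item :: y :: ys else y :: pvInsertDesc ys item

def analyze_themes_from_transcripts_py_alt (transcripts : List (List (String × String))) : List String :=
  let all_text := PySem.Str.lower (PySem.Str.join " " (transcripts.map (fun t => PySem.Dict.getD ⟨t⟩ "full_text" "")))
  let top := pvThemeKeywords.foldl (fun top p =>
      let score : Int := (p.2.map (fun kw => (PySem.Str.count all_text kw : Int))).sum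
      if score > 0 then (pvInsertDesc top (p.1, score)).take 3 else top) ([] : List (String × Int))
  top.map (·.1)

-- ===== PRECONDITION & SPEC =====
def Spec_analyze_themes_from_transcripts_py (transcripts : List (List (String × String))) (out : List String) : Prop := out = analyze_themes_from_transcripts_py_alt transcripts
instance (transcripts : List (List (String × String))) (out : List String) : Decidable (Spec_analyze_themes_from_transcripts_py transcripts out) := by unfold Spec_analyze_themes_from_transcripts_py; infer_instance

-- ===== CLAIM (what is proved, stated in full; the proofs are below) =====
def Claim_equal_analyze_themes_from_transcripts_py : Prop := ∀ (transcripts : List (List (String × String))), Dom_analyze_themes_from_transcripts_py transcripts → Spec_analyze_themes_from_transcripts_py transcripts (analyze_themes_from_transcripts_py transcripts)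

-- ===== LEMMAS AND PROOFS =====

-- pvInsertDesc is insertBy with the reverse-sort predicate on scores
theorem pvInsertDesc_eq_insertBy (ys : List (String × Int)) (x : String × Int) :
    pvInsertDesc ys x = PySem.List.insertBy (fun a b => decide (b.2 < a.2)) x ys := by
  induction ys with
  | nil => rfl
  | cons y t ih => simp only [pvInsertDesc, PySem.List.insertBy, ih, decide_eq_true_eq]

theorem take_cons_take {α : Type} (k : Nat) (y : α) (t : List α) :
    List.take k (y :: List.take k t) = List.take k (y :: t) := by
  cases k with
  | zero => simp
  | succ m => simp [List.take_take]

-- truncating the accumulator to k commutes with inserting then truncating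
theorem take_pvInsertDesc (ys : List (String × Int)) (k : Nat) (x : String × Int) :
    (pvInsertDesc (ys.take k) x).take k = (pvInsertDesc ys x).take k := by
  induction ys generalizing k with
  | nil => simp
  | cons y t ih =>
    cases k with
    | zero => simp
    | succ k' =>
      simp only [List.take_succ_cons, pvInsertDesc]
      split
      · simp only [List.take_succ_cons, take_cons_take]
      · simp only [List.take_succ_cons, ih k']

-- the bounded-insertion fold is the unbounded one truncated to 3
theorem foldl_take3 (c : (String × List String) → Prop) [DecidablePred c]
    (f : (String × List String) → String × Int)
    (ps : List (String × List String)) (acc : List (String × Int)) :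
    ps.foldl (fun top p => if c p then (pvInsertDesc top (f p)).take 3 else top) (acc.take 3)
      = (ps.foldl (fun top p => if c p then pvInsertDesc top (f p) else top) acc).take 3 := by
  induction ps generalizing acc with
  | nil => rfl
  | cons p t ih =>
    simp only [List.foldl_cons]
    by_cases h : c p
    · simp only [h, if_pos]
      rw [take_pvInsertDesc, ih]
    · simp only [h, if_neg, not_false_iff, ih]

-- a conditional fold is the fold over the filtered, mapped list
theorem foldl_if_filter_map {α β γ : Type} (c : α → Prop) [DecidablePred c]
    (f : α → β) (g : γ → β → γ) (ps : List α) (acc : γ) :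
    ps.foldl (fun top p => if c p then g top (f p) else top) acc
      = ((ps.filter (fun p => decide (c p))).map f).foldl g acc := by
  induction ps generalizing acc with
  | nil => rfl
  | cons p t ih =>
    by_cases h : c p <;> simp [h, ih]

-- the common core of both ports, abstracted over the joined lowered text
theorem pv_main (all_text : String) :
    ((PySem.List.sorted
        (pvThemeKeywords.foldl (fun acc p =>
          let score : Int := (p.2.map (fun kw => (PySem.Str.count all_text kw : Int))).sum
          if score > 0 then acc ++ [(p.1, score)] else acc) [])
        (fun x => x.2) true).take 3).map (fun x => x.1)
    = (pvThemeKeywords.foldl (fun top p =>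
          let score : Int := (p.2.map (fun kw => (PySem.Str.count all_text kw : Int))).sum
          if score > 0 then (pvInsertDesc top (p.1, score)).take 3 else top) []).map (fun x => x.1) := by
  show ((PySem.List.sorted
          (pvThemeKeywords.foldl (fun acc p =>
            if ((p.2.map (fun kw => (PySem.Str.count all_text kw : Int))).sum) > 0
            then acc ++ [(p.1, (p.2.map (fun kw => (PySem.Str.count all_text kw : Int))).sum)] else acc) [])
          (fun x => x.2) true).take 3).map (fun x => x.1)
      = (pvThemeKeywords.foldl (fun top p =>
            if ((p.2.map (fun kw => (PySem.Str.count all_text kw : Int))).sum) > 0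
            then (pvInsertDesc top (p.1, (p.2.map (fun kw => (PySem.Str.count all_text kw : Int))).sum)).take 3 else top) []).map (fun x => x.1)
  rw [foldl_if_filter_map (fun p => ((p.2.map (fun kw => (PySem.Str.count all_text kw : Int))).sum) > 0)
        (fun p => (p.1, (p.2.map (fun kw => (PySem.Str.count all_text kw : Int))).sum))
        (fun acc x => acc ++ [x]) pvThemeKeywords ([] : List (String × Int)),
      PySem.List.foldl_append_singleton, List.nil_append]
  have h1 : ([] : List (String × Int)) = ([] : List (String × Int)).take 3 := rfl
  rw [h1, foldl_take3 (fun p => ((p.2.map (fun kw => (PySem.Str.count all_text kw : Int))).sum) > 0)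
        (fun p => (p.1, (p.2.map (fun kw => (PySem.Str.count all_text kw : Int))).sum)) pvThemeKeywords,
      foldl_if_filter_map (fun p => ((p.2.map (fun kw => (PySem.Str.count all_text kw : Int))).sum) > 0)
        (fun p => (p.1, (p.2.map (fun kw => (PySem.Str.count all_text kw : Int))).sum)) pvInsertDesc pvThemeKeywords]
  rw [PySem.List.sorted_rev_eq_foldl_insertBy,
      show pvInsertDesc = fun ys x => PySem.List.insertBy (fun a b => decide (b.2 < a.2)) x ys
        from funext fun ys => funext fun x => pvInsertDesc_eq_insertBy ys x]

-- ===== VERDICT (by name: the statement is the Claim_ definition above) =====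
theorem analyze_themes_from_transcripts_py_spec : Claim_equal_analyze_themes_from_transcripts_py := by
  intro transcripts _
  unfold Spec_analyze_themes_from_transcripts_py
  unfold analyze_themes_from_transcripts_py analyze_themes_from_transcripts_py_alt
  exact pv_main _
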